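-- pv_equiv track=rewrite | github.com/Adamkadaban/Competition-Programs | Kattis/symmetric order.py | newList
-- ===== SOURCE A (Python) =====
-- def newList(n):
--   x=n[::-1]
--   r=[]
--   for i in range(len(x)):
--     if i%2==0:
--       r.append(x[i])
--     else:
--       r.insert(0,x[i])
--   if len(n)%2==0:
--     return r
--   return r[::-1]
-- ===== SOURCE B (Python) =====
-- def newList(n):
--     front = []
--     back = []
--     even = True
--     for v in n:
--         if even:
--             front.append(v)
--         else:
--             back.append(v)
--         even = not even
--     back.reverse()
--     return front + back
-- ===== Notes on version B (the rewrite author's own statement) =====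
-- stated objective: faster
-- what changed: Instead of reversing the list and alternately appending/inserting-at-front (insert(0,..) is O(n) each time), B makes one forward pass splitting elements by index parity into two lists and returns front + reversed(back).
import Mathlib
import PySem

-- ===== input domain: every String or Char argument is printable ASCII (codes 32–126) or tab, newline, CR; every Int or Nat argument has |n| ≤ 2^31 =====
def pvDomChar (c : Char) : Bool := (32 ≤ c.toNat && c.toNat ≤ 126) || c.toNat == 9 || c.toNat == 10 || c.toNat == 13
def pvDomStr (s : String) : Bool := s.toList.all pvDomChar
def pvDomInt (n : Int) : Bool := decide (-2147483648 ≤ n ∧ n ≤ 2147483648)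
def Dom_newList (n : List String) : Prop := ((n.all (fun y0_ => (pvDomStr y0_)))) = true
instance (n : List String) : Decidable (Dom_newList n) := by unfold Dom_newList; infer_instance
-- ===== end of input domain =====

-- B replaces A's reverse + alternating append/insert(0) (quadratic) by one forward
-- pass splitting on index parity; objective: faster (asymptotic).


-- ===== PORT A =====
-- x = n[::-1]; for i in range(len(x)): even i → r.append(x[i]), odd i → r.insert(0, x[i]);
-- return r if len(n) % 2 == 0 else r[::-1]
-- x = n[::-1]
def pvA_x (n : List String) : List String :=
  (PySem.List.slice? n none none (-1)).getD []
-- r after the for-loop over range(len(x))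
def pvA_r (n : List String) : List String :=
  (PySem.List.pyRange 0 ((pvA_x n).length : Int) 1).foldl
    (fun r i =>
      if PySem.Int.mod i 2 == 0 then r ++ [PySem.List.pyGetD (pvA_x n) i ""]
      else PySem.List.insert r 0 (PySem.List.pyGetD (pvA_x n) i "")) []
def newList (n : List String) : List String :=
  if PySem.Int.mod (n.length : Int) 2 == 0 then pvA_r n
  else (PySem.List.slice? (pvA_r n) none none (-1)).getD []

-- ===== PORT B =====
-- one forward pass: split by index parity into front/back, then front + reversed back
def newList_alt (n : List String) : List String :=
  let st := n.foldl
    (fun (st : List String × List String × Bool) v =>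
      if st.2.2 then (st.1 ++ [v], st.2.1, !st.2.2)
      else (st.1, st.2.1 ++ [v], !st.2.2)) ([], [], true)
  st.1 ++ st.2.1.reverse

-- ===== PRECONDITION & SPEC =====
def Spec_newList (n : List String) (out : List String) : Prop := out = newList_alt n
instance (n : List String) (out : List String) : Decidable (Spec_newList n out) := by unfold Spec_newList; infer_instance

-- ===== CLAIM (what is proved, stated in full; the proofs are below) =====
def Claim_equal_newList : Prop := ∀ (n : List String), Dom_newList n → Spec_newList n (newList n)

-- ===== LEMMAS AND PROOFS =====

-- elements at even (b = true) / odd (b = false) positions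
def pvPick (b : Bool) : List String → List String
  | [] => []
  | a :: t => if b then a :: pvPick (!b) t else pvPick (!b) t

theorem pvMod2 (j : Nat) : (PySem.Int.mod (j : Int) 2 == 0) = decide (j % 2 = 0) := by
  have h : PySem.Int.mod (j : Int) 2 = ((j % 2 : Nat) : Int) := by
    simp [PySem.Int.mod, Int.fmod_eq_emod]
  rw [h]
  rcases Nat.even_or_odd j with h' | h' <;>
    simp_all [Nat.even_iff, Nat.odd_iff]

theorem pvPick_append_singleton (b : Bool) (u : List String) (a : String) :
    pvPick b (u ++ [a]) =
      pvPick b u ++ (if b == decide (u.length % 2 = 0) then [a] else []) := by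
  induction u generalizing b with
  | nil => cases b <;> simp [pvPick]
  | cons c u' ih =>
    rcases Nat.even_or_odd u'.length with h' | h'
    · have h0 : u'.length % 2 = 0 := Nat.even_iff.mp h'
      have h1 : (u'.length + 1) % 2 = 1 := by omega
      cases b <;> simp [pvPick, ih, h0, h1]
    · have h0 : u'.length % 2 = 1 := Nat.odd_iff.mp h'
      have h1 : (u'.length + 1) % 2 = 0 := by omega
      cases b <;> simp [pvPick, ih, h0, h1]

theorem pvPick_reverse (l : List String) (b : Bool) :
    pvPick b l.reverse = (pvPick (if l.length % 2 = 0 then !b else b) l).reverse := by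
  induction l generalizing b with
  | nil => simp [pvPick]
  | cons a t ih =>
    rw [List.reverse_cons, pvPick_append_singleton, ih, List.length_reverse]
    rcases Nat.even_or_odd t.length with h' | h'
    · have h0 : t.length % 2 = 0 := Nat.even_iff.mp h'
      have h1 : (t.length + 1) % 2 = 1 := by omega
      cases b <;> simp [pvPick, h0, h1]
    · have h0 : t.length % 2 = 1 := Nat.odd_iff.mp h'
      have h1 : (t.length + 1) % 2 = 0 := by omega
      cases b <;> simp [pvPick, h0, h1]

-- B's loop invariant
theorem pvLoopB (l : List String) (f bk : List String) (b : Bool) :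
    l.foldl
      (fun (st : List String × List String × Bool) v =>
        if st.2.2 then (st.1 ++ [v], st.2.1, !st.2.2)
        else (st.1, st.2.1 ++ [v], !st.2.2)) (f, bk, b) =
      (f ++ pvPick b l, bk ++ pvPick (!b) l,
        if l.length % 2 = 0 then b else !b) := by
  induction l generalizing f bk b with
  | nil => simp [pvPick]
  | cons a t ih =>
    rcases Nat.even_or_odd t.length with h' | h'
    · have h0 : t.length % 2 = 0 := Nat.even_iff.mp h'
      have h1 : (t.length + 1) % 2 = 1 := by omega
      cases b <;> simp [pvPick, ih, h0, h1]
    · have h0 : t.length % 2 = 1 := Nat.odd_iff.mp h'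
      have h1 : (t.length + 1) % 2 = 0 := by omega
      cases b <;> simp [pvPick, ih, h0, h1]

theorem newList_alt_eq (n : List String) :
    newList_alt n = pvPick true n ++ (pvPick false n).reverse := by
  simp [newList_alt, pvLoopB]

theorem pvInsert_zero (r : List String) (a : String) :
    PySem.List.insert r 0 a = a :: r := by
  simp [PySem.List.insert, PySem.List.sliceIndices]

-- A's loop invariant: processing the suffix x.drop j = d from state r
theorem pvLoopA (x : List String) (d : List String) (j : Nat) (r : List String)
    (hd : x.drop j = d) :
    (PySem.List.pyRange (j : Int) (x.length : Int) 1).foldl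
      (fun r i =>
        if PySem.Int.mod i 2 == 0 then r ++ [PySem.List.pyGetD x i ""]
        else PySem.List.insert r 0 (PySem.List.pyGetD x i "")) r =
      (if j % 2 = 0
        then (pvPick false d).reverse ++ r ++ pvPick true d
        else (pvPick true d).reverse ++ r ++ pvPick false d) := by
  induction d generalizing j r with
  | nil =>
    have hj : x.length ≤ j := by
      by_contra h
      have := List.drop_eq_nil_iff.mp hd
      omega
    rw [PySem.List.pyRange_one_eq_nil (by exact_mod_cast hj)]
    split <;> simp [pvPick]
  | cons a t ih =>
    have hj : j < x.length := by
      by_contra h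
      rw [List.drop_eq_nil_of_le (by omega)] at hd
      simp at hd
    have hget : PySem.List.pyGetD x (j : Int) "" = a := by
      have hx : x[j]? = some a := by
        have := congrArg List.head? hd
        simpa [List.head?_drop] using this
      simp [PySem.List.pyGetD_natCast, List.getD, hx]
    have hd' : x.drop (j + 1) = t := by
      have := congrArg List.tail hd
      simpa [List.tail_drop] using this
    rw [PySem.List.pyRange_one_cons (by exact_mod_cast hj), List.foldl_cons, pvMod2]
    rcases Nat.even_or_odd j with h' | h'
    · have h0 : j % 2 = 0 := Nat.even_iff.mp h'
      have h1 : (j + 1) % 2 = 1 := by omega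
      have hc : decide (j % 2 = 0) = true := by simp [h0]
      simp only [hc, if_true, hget]
      have hstep := ih (j + 1) (r ++ [a]) hd'
      push_cast at hstep ⊢
      rw [hstep]
      simp [h1, pvPick, h0]
    · have h0 : j % 2 = 1 := Nat.odd_iff.mp h'
      have h1 : (j + 1) % 2 = 0 := by omega
      have hc : decide (j % 2 = 0) = false := by simp [h0]
      simp only [hc, Bool.false_eq_true, if_false, hget]
      rw [pvInsert_zero]
      have hstep := ih (j + 1) (a :: r) hd'
      push_cast at hstep ⊢
      rw [hstep]
      simp [h1, pvPick, h0]

theorem newList_eq (n : List String) :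
    newList n = pvPick true n ++ (pvPick false n).reverse := by
  have hx : pvA_x n = n.reverse := by
    unfold pvA_x; rw [PySem.List.slice?_none_none_neg_one]; rfl
  have hr : pvA_r n = (pvPick false n.reverse).reverse ++ pvPick true n.reverse := by
    have hloop := pvLoopA n.reverse n.reverse 0 [] (by simp)
    simp only [Nat.zero_mod, List.append_nil] at hloop
    unfold pvA_r
    rw [show pvA_x n = n.reverse from hx]
    exact_mod_cast hloop
  unfold newList
  rw [hr, pvMod2]
  rcases Nat.even_or_odd n.length with h' | h'
  · have h0 : n.length % 2 = 0 := Nat.even_iff.mp h'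
    have hc : decide (n.length % 2 = 0) = true := by simp [h0]
    simp only [hc, if_true]
    rw [pvPick_reverse, pvPick_reverse]
    simp [h0]
  · have h0 : n.length % 2 = 1 := Nat.odd_iff.mp h'
    have hc : decide (n.length % 2 = 0) = false := by simp [h0]
    simp only [hc, Bool.false_eq_true, if_false]
    rw [PySem.List.slice?_none_none_neg_one]
    simp only [Option.getD_some]
    rw [pvPick_reverse, pvPick_reverse]
    simp [h0]

-- ===== VERDICT (by name: the statement is the Claim_ definition above) =====
theorem newList_spec : Claim_equal_newList := by
  intro n _
  unfold Spec_newList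
  rw [newList_eq, newList_alt_eq]
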